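-- pv_equiv track=rewrite | github.com/Darshan2042/DSA-Python | TCS_NQT_2026/Numbers/Replace all 0s with 1s in a given intege.py | replace_zero
-- ===== SOURCE A (Python) =====
-- def replace_zero(n):
--     result = 0
--     place = 1
--
--     while n > 0:
--         digit = n % 10
--
--         if digit == 0:
--             digit = 1
--
--         result += digit * place
--         place *= 10
--         n //= 10
--
--     return result
-- ===== SOURCE B (Python) =====
-- def replace_zero(n):
--     if n <= 0:
--         return 0
--     return replace_zero(n // 10) * 10 + (n % 10 or 1)
-- ===== Notes on version B (the rewrite author's own statement) =====
-- stated objective: simpler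
-- what changed: Replaces A's while-loop with result/place accumulators by a direct top-down recursion on the quotient of the leading digits that keeps no accumulator state.
import Mathlib
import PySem

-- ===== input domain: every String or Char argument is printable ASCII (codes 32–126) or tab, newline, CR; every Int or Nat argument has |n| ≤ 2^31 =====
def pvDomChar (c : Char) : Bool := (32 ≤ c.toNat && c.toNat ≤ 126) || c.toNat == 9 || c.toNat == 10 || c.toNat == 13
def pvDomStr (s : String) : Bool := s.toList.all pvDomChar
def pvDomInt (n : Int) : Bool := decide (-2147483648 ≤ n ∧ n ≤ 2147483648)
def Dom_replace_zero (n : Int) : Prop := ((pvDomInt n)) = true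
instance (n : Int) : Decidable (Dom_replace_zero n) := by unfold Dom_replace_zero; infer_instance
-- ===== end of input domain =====

-- B replaces A's while-loop with result/place accumulators by a direct top-down
-- recursion on the quotient with no accumulator state (simpler; same cost; speed unmeasured).

-- ===== PORT A =====
-- the while-loop of A: state (n, result, place)
def replaceZeroLoop (n result place : Int) : Int :=
  if h : 0 < n then
    let digit := PySem.Int.mod n 10
    let digit := if digit = 0 then 1 else digit
    replaceZeroLoop (PySem.Int.floordiv n 10) (result + digit * place) (place * 10)
  else result
termination_by n.toNat
decreasing_by
  rw [PySem.Int.floordiv_eq_ediv_of_pos (by omega)]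
  omega

def replace_zero (n : Int) : Int := replaceZeroLoop n 0 1

-- ===== PORT B =====
def replace_zero_alt (n : Int) : Int :=
  if h : n ≤ 0 then 0
  else replace_zero_alt (PySem.Int.floordiv n 10) * 10 +
    (let d := PySem.Int.mod n 10; if d = 0 then 1 else d)
termination_by n.toNat
decreasing_by
  rw [PySem.Int.floordiv_eq_ediv_of_pos (by omega)]
  omega

-- ===== PRECONDITION & SPEC =====
def Spec_replace_zero (n : Int) (out : Int) : Prop := out = replace_zero_alt n
instance (n : Int) (out : Int) : Decidable (Spec_replace_zero n out) := by unfold Spec_replace_zero; infer_instance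

-- ===== CLAIM (what is proved, stated in full; the proofs are below) =====
def Claim_equal_replace_zero : Prop := ∀ (n : Int), Dom_replace_zero n → Spec_replace_zero n (replace_zero n)

-- ===== LEMMAS AND PROOFS =====

-- A's loop computes result + place * (B's value); induction on n.toNat.
theorem replaceZeroLoop_eq_alt (n : Int) : ∀ result place : Int,
    replaceZeroLoop n result place = result + place * replace_zero_alt n := by
  induction hn : n.toNat using Nat.strong_induction_on generalizing n with
  | _ k ih =>
    intro result place
    by_cases h : 0 < n
    · have hd : PySem.Int.floordiv n 10 = n / 10 :=
        PySem.Int.floordiv_eq_ediv_of_pos (by omega)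
      rw [replaceZeroLoop, dif_pos h]
      rw [ih (PySem.Int.floordiv n 10).toNat (by rw [hd]; omega) _ rfl]
      conv_rhs => rw [replace_zero_alt, dif_neg (by omega)]
      ring
    · rw [replaceZeroLoop, dif_neg h, replace_zero_alt, dif_pos (by omega)]
      ring

-- ===== VERDICT (by name: the statement is the Claim_ definition above) =====
theorem replace_zero_spec : Claim_equal_replace_zero := by
  intro n _
  unfold Spec_replace_zero replace_zero
  rw [replaceZeroLoop_eq_alt]
  ring
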